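-- pv_equiv track=rewrite | github.com/pfe-rs/zr-s-2024-slagalica | klase.py | resivo
-- ===== SOURCE A (Python) =====
-- def resivo(tab):
--     numOfInversions = 0
--     length = len(tab)
--     for i in range(length-1):
--         for j in range(i+1, length):
--             if tab[i] > tab[j]:
--                 numOfInversions += 1
--     return numOfInversions % 2 == 0
-- ===== SOURCE B (Python) =====
-- def resivo(tab):
--     # Merge-sort based inversion counting: O(n log n) instead of A's O(n^2).
--     def merge_count(xs):
--         if len(xs) <= 1:
--             return xs, 0
--         mid = len(xs) // 2
--         left, cl = merge_count(xs[:mid])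
--         right, cr = merge_count(xs[mid:])
--         merged = []
--         inv = 0
--         i = 0
--         j = 0
--         while i < len(left) and j < len(right):
--             if left[i] <= right[j]:
--                 merged.append(left[i])
--                 i += 1
--             else:
--                 merged.append(right[j])
--                 j += 1
--                 inv += len(left) - i
--         merged.extend(left[i:])
--         merged.extend(right[j:])
--         return merged, cl + cr + inv
--     _, total = merge_count(tab)
--     return total % 2 == 0
-- ===== Notes on version B (the rewrite author's own statement) =====
-- stated objective: faster
-- what changed: Replaced the quadratic double loop over all index pairs by a merge-sort that counts inversions during the merge step.
import Mathlib
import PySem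

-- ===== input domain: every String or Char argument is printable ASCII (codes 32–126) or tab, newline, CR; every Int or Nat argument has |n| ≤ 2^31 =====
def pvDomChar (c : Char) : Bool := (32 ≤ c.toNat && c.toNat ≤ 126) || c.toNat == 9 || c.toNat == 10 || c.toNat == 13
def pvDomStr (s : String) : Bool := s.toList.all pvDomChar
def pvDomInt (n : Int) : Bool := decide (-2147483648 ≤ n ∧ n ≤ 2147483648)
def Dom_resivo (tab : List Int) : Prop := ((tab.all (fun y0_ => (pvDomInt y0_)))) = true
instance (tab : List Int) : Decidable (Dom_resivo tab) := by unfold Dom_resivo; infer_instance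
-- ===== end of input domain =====

-- B replaces A's quadratic double loop by merge-sort inversion counting; same return value, asymptotically faster.


-- ===== PORT A =====
-- tab[i] / tab[j] ported with pyGetD: both indices always lie in range here, so this is exact.
def resivo (tab : List Int) : Bool :=
  let length : Int := tab.length
  let numOfInversions : Int :=
    (PySem.List.pyRange 0 (length - 1) 1).foldl (fun acc i =>
      (PySem.List.pyRange (i + 1) length 1).foldl (fun acc2 j =>
        if PySem.List.pyGetD tab i 0 > PySem.List.pyGetD tab j 0 then acc2 + 1 else acc2) acc) 0
  PySem.Int.mod numOfInversions 2 == 0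

-- ===== PORT B =====
-- the merging while-loop of Source B (structural recursion on the two halves; second component
-- is the number of cross inversions counted as 'len(left) - i' whenever the right head wins)
def pvMergeCount : List Int → List Int → List Int × Nat
  | [], ys => (ys, 0)
  | x :: xs, [] => (x :: xs, 0)
  | x :: xs, y :: ys =>
    if x ≤ y then
      (x :: (pvMergeCount xs (y :: ys)).1, (pvMergeCount xs (y :: ys)).2)
    else
      (y :: (pvMergeCount (x :: xs) ys).1, (pvMergeCount (x :: xs) ys).2 + (x :: xs).length)

-- merge_count of Source B: returns (sorted copy, inversion count)
def pvMsort : List Int → List Int × Nat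
  | [] => ([], 0)
  | [x] => ([x], 0)
  | a :: b :: rest =>
    let mid := (a :: b :: rest).length / 2
    let l := pvMsort ((a :: b :: rest).take mid)
    let r := pvMsort ((a :: b :: rest).drop mid)
    ((pvMergeCount l.1 r.1).1, l.2 + r.2 + (pvMergeCount l.1 r.1).2)
  termination_by xs => xs.length
  decreasing_by
    all_goals simp [List.length_take, List.length_drop]
    all_goals omega

def resivo_alt (tab : List Int) : Bool :=
  (pvMsort tab).2 % 2 == 0

-- ===== PRECONDITION & SPEC =====
def Spec_resivo (tab : List Int) (out : Bool) : Prop := out = resivo_alt tab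
instance (tab : List Int) (out : Bool) : Decidable (Spec_resivo tab out) := by unfold Spec_resivo; infer_instance

-- ===== CLAIM (what is proved, stated in full; the proofs are below) =====
def Claim_equal_resivo : Prop := ∀ (tab : List Int), Dom_resivo tab → Spec_resivo tab (resivo tab)

-- ===== LEMMAS AND PROOFS =====

-- the number of inversions of a list, head-recursively
def pvInv : List Int → Nat
  | [] => 0
  | x :: xs => xs.countP (fun y => decide (x > y)) + pvInv xs

-- inversions between two lists: pairs (x ∈ xs, y ∈ ys) with x > y
def pvCross (xs ys : List Int) : Nat :=
  (xs.map (fun x => ys.countP (fun y => decide (x > y)))).sum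

lemma pvInv_append (xs ys : List Int) :
    pvInv (xs ++ ys) = pvInv xs + pvInv ys + pvCross xs ys := by
  induction xs with
  | nil => simp [pvInv, pvCross]
  | cons x xs ih =>
    simp only [List.cons_append, pvInv, List.countP_append, ih, pvCross, List.map_cons,
      List.sum_cons]
    omega

lemma pvCross_perm_left {xs xs' : List Int} (h : xs.Perm xs') (ys : List Int) :
    pvCross xs ys = pvCross xs' ys := by
  unfold pvCross
  exact (h.map _).sum_eq

lemma pvCross_perm_right (xs : List Int) {ys ys' : List Int} (h : ys.Perm ys') :
    pvCross xs ys = pvCross xs ys' := by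
  unfold pvCross
  congr 1
  exact List.map_congr_left (fun x _ => h.countP_eq _)

lemma pvMergeCount_perm (xs ys : List Int) : (pvMergeCount xs ys).1.Perm (xs ++ ys) := by
  induction xs generalizing ys with
  | nil => simp [pvMergeCount]
  | cons x xs ihx =>
    induction ys with
    | nil => simp [pvMergeCount]
    | cons y ys ihy =>
      by_cases h : x ≤ y
      · have e : pvMergeCount (x :: xs) (y :: ys)
            = (x :: (pvMergeCount xs (y :: ys)).1, (pvMergeCount xs (y :: ys)).2) := by
          simp [pvMergeCount, h]
        rw [e]
        simpa using (ihx (y :: ys)).cons x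
      · have e : pvMergeCount (x :: xs) (y :: ys)
            = (y :: (pvMergeCount (x :: xs) ys).1,
               (pvMergeCount (x :: xs) ys).2 + (x :: xs).length) := by
          simp [pvMergeCount, h]
        rw [e]
        exact (ihy.cons y).trans List.perm_middle.symm

lemma pvMergeCount_sorted (xs ys : List Int) :
    xs.Pairwise (· ≤ ·) → ys.Pairwise (· ≤ ·) → (pvMergeCount xs ys).1.Pairwise (· ≤ ·) := by
  induction xs generalizing ys with
  | nil => intro _ hy; simpa [pvMergeCount] using hy
  | cons x xs ihx =>
    induction ys with
    | nil => intro hx _; simpa [pvMergeCount] using hx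
    | cons y ys ihy =>
      intro hx hy
      rcases List.pairwise_cons.mp hx with ⟨hx1, hx2⟩
      rcases List.pairwise_cons.mp hy with ⟨hy1, hy2⟩
      by_cases h : x ≤ y
      · have e : pvMergeCount (x :: xs) (y :: ys)
            = (x :: (pvMergeCount xs (y :: ys)).1, (pvMergeCount xs (y :: ys)).2) := by
          simp [pvMergeCount, h]
        rw [e]
        refine List.pairwise_cons.mpr ⟨?_, ihx (y :: ys) hx2 hy⟩
        intro z hz
        have hz' : z ∈ xs ++ (y :: ys) := (pvMergeCount_perm xs (y :: ys)).mem_iff.mp hz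
        rcases List.mem_append.mp hz' with hzx | hzy
        · exact hx1 z hzx
        · rcases List.mem_cons.mp hzy with rfl | hzy
          · exact h
          · exact le_trans h (hy1 z hzy)
      · have e : pvMergeCount (x :: xs) (y :: ys)
            = (y :: (pvMergeCount (x :: xs) ys).1,
               (pvMergeCount (x :: xs) ys).2 + (x :: xs).length) := by
          simp [pvMergeCount, h]
        rw [e]
        have hyx : y ≤ x := le_of_not_ge h
        refine List.pairwise_cons.mpr ⟨?_, ihy hx hy2⟩
        intro z hz
        have hz' : z ∈ (x :: xs) ++ ys := (pvMergeCount_perm (x :: xs) ys).mem_iff.mp hz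
        rcases List.mem_append.mp hz' with hzx | hzy
        · rcases List.mem_cons.mp hzx with rfl | hzx
          · exact hyx
          · exact le_trans hyx (hx1 z hzx)
        · exact hy1 z hzy

lemma pvSumMapSucc (l : List Int) (g : Int → Nat) :
    (l.map (fun a => g a + 1)).sum = (l.map g).sum + l.length := by
  induction l with
  | nil => simp
  | cons a l ih => simp only [List.map_cons, List.sum_cons, List.length_cons, ih]; omega

lemma pvMergeCount_count (xs ys : List Int) :
    xs.Pairwise (· ≤ ·) → ys.Pairwise (· ≤ ·) →
      (pvMergeCount xs ys).2 = pvCross xs ys := by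
  induction xs generalizing ys with
  | nil => intro _ _; simp [pvMergeCount, pvCross]
  | cons x xs ihx =>
    induction ys with
    | nil => intro _ _; simp [pvMergeCount, pvCross]
    | cons y ys ihy =>
      intro hx hy
      rcases List.pairwise_cons.mp hx with ⟨hx1, hx2⟩
      rcases List.pairwise_cons.mp hy with ⟨hy1, hy2⟩
      by_cases h : x ≤ y
      · have e : pvMergeCount (x :: xs) (y :: ys)
            = (x :: (pvMergeCount xs (y :: ys)).1, (pvMergeCount xs (y :: ys)).2) := by
          simp [pvMergeCount, h]
        rw [e]
        show (pvMergeCount xs (y :: ys)).2 = pvCross (x :: xs) (y :: ys)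
        rw [ihx (y :: ys) hx2 hy]
        have hc : (y :: ys).countP (fun z => decide (x > z)) = 0 := by
          rw [List.countP_eq_zero]
          intro z hz
          rcases List.mem_cons.mp hz with rfl | hz
          · simpa using not_lt.mpr h
          · simpa using not_lt.mpr (le_trans h (hy1 z hz))
        unfold pvCross
        simp [hc]
      · have e : pvMergeCount (x :: xs) (y :: ys)
            = (y :: (pvMergeCount (x :: xs) ys).1,
               (pvMergeCount (x :: xs) ys).2 + (x :: xs).length) := by
          simp [pvMergeCount, h]
        rw [e]
        show (pvMergeCount (x :: xs) ys).2 + (x :: xs).length = pvCross (x :: xs) (y :: ys)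
        rw [ihy hx hy2]
        have hyx : y < x := lt_of_not_ge h
        have key : ∀ a ∈ x :: xs,
            (fun a => (y :: ys).countP (fun z => decide (a > z))) a
              = (fun a => ys.countP (fun z => decide (a > z)) + 1) a := by
          intro a ha
          have hya : y < a := by
            rcases List.mem_cons.mp ha with rfl | ha
            · exact hyx
            · exact lt_of_lt_of_le hyx (hx1 a ha)
          simp [gt_iff_lt, hya]
        unfold pvCross
        rw [List.map_congr_left key, pvSumMapSucc]

lemma pvMsort_spec (xs : List Int) :
    (pvMsort xs).1.Perm xs ∧ (pvMsort xs).1.Pairwise (· ≤ ·) ∧ (pvMsort xs).2 = pvInv xs := by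
  induction hn : xs.length using Nat.strong_induction_on generalizing xs with
  | _ n ih =>
  match xs, hn with
  | [], _ => simp [pvMsort, pvInv]
  | [x], _ => simp [pvMsort, pvInv]
  | a :: b :: rest, hn =>
    obtain ⟨p1, s1, c1⟩ := ih ((a :: b :: rest).take ((a :: b :: rest).length / 2)).length
      (by simp only [List.length_take, List.length_cons] at hn ⊢; omega) _ rfl
    obtain ⟨p2, s2, c2⟩ := ih ((a :: b :: rest).drop ((a :: b :: rest).length / 2)).length
      (by simp only [List.length_drop, List.length_cons] at hn ⊢; omega) _ rfl
    simp only [pvMsort]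
    refine ⟨?_, ?_, ?_⟩
    · refine (pvMergeCount_perm _ _).trans ((p1.append p2).trans ?_)
      rw [List.take_append_drop]
    · exact pvMergeCount_sorted _ _ s1 s2
    · rw [pvMergeCount_count _ _ s1 s2, pvCross_perm_left p1 _, pvCross_perm_right _ p2, c1, c2]
      have h2 := pvInv_append ((a :: b :: rest).take ((a :: b :: rest).length / 2))
        ((a :: b :: rest).drop ((a :: b :: rest).length / 2))
      rw [List.take_append_drop] at h2
      omega

-- row k of A's double loop, summed over k, is the inversion count
lemma rows_nat (tab : List Int) :
    ((List.range (tab.length - 1)).map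
      (fun k => ((tab.drop (k + 1)).countP (fun y => decide (tab.getD k 0 > y))))).sum
      = pvInv tab := by
  induction tab with
  | nil => simp [pvInv]
  | cons x xs ih =>
    cases xs with
    | nil => simp [pvInv]
    | cons b t =>
      have hlen : (x :: b :: t).length - 1 = t.length + 1 := by simp
      rw [hlen, List.range_succ_eq_map, List.map_cons, List.sum_cons, List.map_map]
      have hcomp : (List.range t.length).map
          ((fun k => ((x :: b :: t).drop (k + 1)).countP
            (fun y => decide ((x :: b :: t).getD k 0 > y))) ∘ Nat.succ)
          = (List.range t.length).map
          (fun k => ((b :: t).drop (k + 1)).countP (fun y => decide ((b :: t).getD k 0 > y))) := by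
        apply List.map_congr_left
        intro k _
        simp [Function.comp, Nat.succ_eq_add_one]
      rw [hcomp]
      rw [show (b :: t).length - 1 = t.length from by simp] at ih
      rw [ih]
      simp [pvInv]

-- A's nested fold computes the inversion count
lemma numA_eq (tab : List Int) :
    (PySem.List.pyRange 0 ((tab.length : Int) - 1) 1).foldl (fun acc i =>
      (PySem.List.pyRange (i + 1) (tab.length : Int) 1).foldl (fun acc2 j =>
        if PySem.List.pyGetD tab i 0 > PySem.List.pyGetD tab j 0 then acc2 + 1 else acc2) acc)
      (0 : Int) = (pvInv tab : Int) := by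
  have hstep : ∀ (acc : Int), ∀ i ∈ PySem.List.pyRange 0 ((tab.length : Int) - 1) 1,
      (PySem.List.pyRange (i + 1) (tab.length : Int) 1).foldl (fun acc2 j =>
        if PySem.List.pyGetD tab i 0 > PySem.List.pyGetD tab j 0 then acc2 + 1 else acc2) acc
      = acc + ((tab.drop (i + 1).toNat).countP
          (fun y => decide (PySem.List.pyGetD tab i 0 > y)) : Int) := by
    intro acc i hi
    have h0 : (0 : Int) ≤ i + 1 := by
      have := (PySem.List.mem_pyRange_one.mp hi).1
      omega
    rw [PySem.List.foldl_pyRange_pyGetD' tab 0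
      (fun acc2 y => if PySem.List.pyGetD tab i 0 > y then acc2 + 1 else acc2) acc h0]
    rw [PySem.List.foldl_ite_add_one]
  rw [PySem.List.foldl_congr_mem _ _ _ _ hstep, PySem.List.foldl_add, zero_add,
    PySem.List.pyRange_one, List.map_map]
  have hm : (((tab.length : Int) - 1) - 0).toNat = tab.length - 1 := by omega
  rw [hm, ← rows_nat tab, Nat.cast_list_sum, List.map_map]
  apply congrArg List.sum
  apply List.map_congr_left
  intro k _
  simp only [Function.comp_apply, zero_add]
  have h1 : ((k : Int) + 1).toNat = k + 1 := by omega
  rw [h1, PySem.List.pyGetD_natCast]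

lemma resivo_eq_inv (tab : List Int) : resivo tab = ((pvInv tab % 2) == 0) := by
  simp only [resivo]
  rw [numA_eq]
  have hmod : PySem.Int.mod ((pvInv tab : Nat) : Int) 2 = ((pvInv tab % 2 : Nat) : Int) := by
    exact_mod_cast PySem.Int.mod_natCast (pvInv tab) 2
  rw [hmod]
  rcases Nat.mod_two_eq_zero_or_one (pvInv tab) with h | h <;> simp [h]

-- ===== VERDICT (by name: the statement is the Claim_ definition above) =====
theorem resivo_spec : Claim_equal_resivo := by
  intro tab _
  unfold Spec_resivo resivo_alt
  rw [resivo_eq_inv, (pvMsort_spec tab).2.2]
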